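-- pv_equiv track=rewrite | github.com/abbasmoosajee07/AlgoVault | eldarverse/sep_25/Problem_B/eldarverse-sep-25-B.py | possible_point_distributions
-- ===== SOURCE A (Python) =====
-- from collections import Counter
--
-- def possible_point_distributions(N: int):
--     """
--     Dynamic programming to get all possible point distributions
--     without enumerating 2^(N*(N-1)) tables.
--     """
--     matches = [(i, j) for i in range(N) for j in range(N) if i != j]
--     dp = Counter()
--     dp[(0,) * N] = 1  # start: all teams 0 points
--
--     for (i, j) in matches:
--         new_dp = Counter()
--         for scores, count in dp.items():
--             scores = list(scores)
--
--             # case 1: home team wins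
--             s1 = scores[:]
--             s1[i] += 1
--             new_dp[tuple(s1)] += count
--
--             # case 2: away team wins
--             s2 = scores[:]
--             s2[j] += 1
--             new_dp[tuple(s2)] += count
--
--         dp = new_dp
--
--     return dp
-- ===== SOURCE B (Python) =====
-- from collections import Counter
--
--
-- def possible_point_distributions(N: int):
--     """One DP round per team instead of one per ordered match: round i settles
--     all N-1 home games of team i at once, enumerating their 2**(N-1) outcome
--     patterns by bitmask (bit for opponent p counted from the high end; bit 0 =
--     home team i wins, bit 1 = opponent wins)."""
--     dp = Counter()
--     dp[(0,) * N] = 1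
--     for i in range(N):
--         opps = [j for j in range(N) if j != i]
--         r = len(opps)
--         new_dp = Counter()
--         for scores, count in dp.items():
--             for mask in range(2 ** r):
--                 t = list(scores)
--                 for p in range(r):
--                     if mask // 2 ** (r - 1 - p) % 2:
--                         t[opps[p]] += 1
--                     else:
--                         t[i] += 1
--                 new_dp[tuple(t)] += count
--         dp = new_dp
--     return dp
-- ===== Notes on version B (the rewrite author's own statement) =====
-- stated objective: alternative
-- what changed: A runs one Counter-DP round per ordered match (quadratically many rounds, two successors per score tuple); B runs one round per team, settling all of that team's home games at once by enumerating their exponentially many outcome patterns with a bitmask, so the DP has only N rounds whose convolution kernel is a subset enumeration instead of a binary branch.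
import Mathlib
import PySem

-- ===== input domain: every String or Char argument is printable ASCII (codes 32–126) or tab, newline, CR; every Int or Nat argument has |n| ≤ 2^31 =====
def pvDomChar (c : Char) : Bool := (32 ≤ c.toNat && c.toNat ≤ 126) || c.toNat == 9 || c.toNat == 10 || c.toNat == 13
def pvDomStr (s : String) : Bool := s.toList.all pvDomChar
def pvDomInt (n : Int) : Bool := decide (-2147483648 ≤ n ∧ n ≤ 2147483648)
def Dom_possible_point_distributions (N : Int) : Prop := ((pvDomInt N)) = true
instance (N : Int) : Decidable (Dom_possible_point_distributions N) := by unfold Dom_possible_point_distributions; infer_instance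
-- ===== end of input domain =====

-- B replaces A's one-DP-round-per-ordered-match loop (2 successors per entry, N*(N-1) rounds) by
-- one DP round per team that settles all N-1 home games of that team at once, enumerating their
-- 2^(N-1) outcome patterns by bitmask ("alternative": same results, a different decomposition).

-- ===== PORT A =====
-- s1 = scores[:]; s1[k] += 1   (k is a team index of a score tuple, always in range: pyGetD/pySetD exact)
def pvBumpA (s : List Int) (k : Int) : List Int :=
  PySem.List.pySetD s k (PySem.List.pyGetD s k 0 + 1)

-- the body of "for scores, count in dp.items(): new_dp[tuple(s1)] += count; new_dp[tuple(s2)] += count"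
def pvStepA (dp : PySem.Dict (List Int) Int) (m : Int × Int) : PySem.Dict (List Int) Int :=
  dp.items.foldl
    (fun nd p => (nd.modify (pvBumpA p.1 m.1) 0 (· + p.2)).modify (pvBumpA p.1 m.2) 0 (· + p.2))
    PySem.Dict.empty

def possible_point_distributions (N : Int) : List (List Int × Int) :=
  -- matches = [(i, j) for i in range(N) for j in range(N) if i != j]
  let ms := (PySem.List.pyRange 0 N).flatMap fun i =>
    (PySem.List.pyRange 0 N).flatMap fun j => if i ≠ j then [(i, j)] else []
  -- dp = Counter(); dp[(0,)*N] = 1   ((0,)*N is empty for N ≤ 0, hence List.replicate N.toNat)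
  let dp0 : PySem.Dict (List Int) Int := PySem.Dict.empty.insert (List.replicate N.toNat 0) 1
  (ms.foldl pvStepA dp0).items

-- ===== PORT B =====
-- t[k] += 1   (k a team index, always in range: pyGetD/pySetD exact)
def pvBumpB (t : List Int) (k : Int) : List Int :=
  PySem.List.pySetD t k (PySem.List.pyGetD t k 0 + 1)

-- t = list(scores); for p in range(r): if mask // 2 ** (r - 1 - p) % 2: t[opps[p]] += 1 else: t[i] += 1
-- (r = len(opps); the exponent r - 1 - p is ≥ 0 for p in range(r), so ^ on toNat is exact)
def pvTupleB (i : Int) (opps : List Int) (scores : List Int) (mask : Int) : List Int :=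
  (PySem.List.pyRange 0 (opps.length : Int)).foldl
    (fun t p =>
      if PySem.Int.mod (PySem.Int.floordiv mask ((2 : Int) ^ ((opps.length : Int) - 1 - p).toNat)) 2 ≠ 0
      then pvBumpB t (PySem.List.pyGetD opps p 0)
      else pvBumpB t i)
    scores

-- one round: opps = [j for j in range(N) if j != i]; for scores, count …: for mask in range(2 ** r) …
def pvStepB (N i : Int) (dp : PySem.Dict (List Int) Int) : PySem.Dict (List Int) Int :=
  let opps := (PySem.List.pyRange 0 N).flatMap fun j => if j ≠ i then [j] else []
  dp.items.foldl
    (fun nd p =>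
      (PySem.List.pyRange 0 ((2 : Int) ^ opps.length)).foldl
        (fun nd mask => nd.modify (pvTupleB i opps p.1 mask) 0 (· + p.2)) nd)
    PySem.Dict.empty

def possible_point_distributions_alt (N : Int) : List (List Int × Int) :=
  ((PySem.List.pyRange 0 N).foldl (fun dp i => pvStepB N i dp)
    ((PySem.Dict.empty : PySem.Dict (List Int) Int).insert (List.replicate N.toNat 0) 1)).items

-- ===== PRECONDITION & SPEC =====
def Spec_possible_point_distributions (N : Int) (out : List (List Int × Int)) : Prop := out = possible_point_distributions_alt N
instance (N : Int) (out : List (List Int × Int)) : Decidable (Spec_possible_point_distributions N out) := by unfold Spec_possible_point_distributions; infer_instance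

-- ===== CLAIM (what is proved, stated in full; the proofs are below) =====
def Claim_equal_possible_point_distributions : Prop := ∀ (N : Int), Dom_possible_point_distributions N → Spec_possible_point_distributions N (possible_point_distributions N)

-- ===== LEMMAS AND PROOFS =====

-- "Counter of a weighted stream": the dict built by adding weight q.2 under key q.1, in order
def pvCnt (S : List (List Int × Int)) : PySem.Dict (List Int) Int :=
  S.foldl (fun nd q => nd.modify q.1 0 (· + q.2)) PySem.Dict.empty

-- expansion of a weighted stream: every (k, c) becomes (g k) keyed children, each of weight c
def pvExp (g : List Int → List (List Int)) (S : List (List Int × Int)) : List (List Int × Int) :=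
  S.flatMap (fun p => (g p.1).map (fun k => (k, p.2)))

-- composed expansion along a list of rounds
def pvChain {α : Type} (g : α → List Int → List (List Int)) : List α → List Int → List (List Int)
  | [], k => [k]
  | a :: as, k => (g a k).flatMap (pvChain g as)

-- A's and B's per-round expansions
def pvGA (m : Int × Int) (k : List Int) : List (List Int) := [pvBumpA k m.1, pvBumpA k m.2]

def pvGB (N : Int) (i : Int) (k : List Int) : List (List Int) :=
  let opps := (PySem.List.pyRange 0 N).flatMap fun j => if j ≠ i then [j] else []
  (PySem.List.pyRange 0 ((2 : Int) ^ opps.length)).map (pvTupleB i opps k)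

theorem pvCnt_keys (S : List (List Int × Int)) :
    (pvCnt S).keys = PySem.Set.ofList (S.map Prod.fst) := by
  rw [pvCnt, PySem.Dict.keys_foldl_modify_key]
  simp [PySem.Dict.keys, PySem.Dict.empty, PySem.Set.update_nil_left]

theorem pvCnt_nodup (S : List (List Int × Int)) : (pvCnt S).keys.Nodup := by
  rw [pvCnt_keys]; exact PySem.Set.nodup_ofList _

theorem pvGetD_foldl_modifyAdd (S : List (List Int × Int)) (acc : PySem.Dict (List Int) Int)
    (t : List Int) :
    (S.foldl (fun nd q => nd.modify q.1 0 (· + q.2)) acc).getD t 0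
      = acc.getD t 0 + (S.map fun q => if q.1 = t then q.2 else 0).sum := by
  induction S generalizing acc with
  | nil => simp
  | cons q S ih =>
    simp only [List.foldl_cons, List.map_cons, List.sum_cons]
    rw [ih, PySem.Dict.getD_modify]
    by_cases h : t = q.1
    · subst h; simp; ring
    · rw [if_neg h, if_neg (fun e => h e.symm)]; ring

theorem pvCnt_getD (S : List (List Int × Int)) (t : List Int) :
    (pvCnt S).getD t 0 = (S.map fun q => if q.1 = t then q.2 else 0).sum := by
  rw [pvCnt, pvGetD_foldl_modifyAdd]; simp

-- dedup commutes with per-key expansion (keys only)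
theorem pvSet_flatMap_ofList (g : List Int → List (List Int)) (l : List (List Int)) :
    PySem.Set.ofList ((PySem.Set.ofList l).flatMap g) = PySem.Set.ofList (l.flatMap g) := by
  induction l using List.reverseRecOn with
  | nil => rfl
  | append_singleton l a ih =>
    rw [PySem.Set.ofList_append_singleton, List.flatMap_append, List.flatMap_singleton,
      PySem.Set.ofList_append]
    by_cases h : a ∈ l
    · rw [PySem.Set.add_of_mem (by rw [PySem.Set.mem_ofList]; exact h), ih]
      rw [PySem.Set.update_eq_append_filter]
      have : (PySem.Set.ofList (g a)).filter
          (fun y => !(PySem.Set.contains (PySem.Set.ofList (l.flatMap g)) y)) = [] := by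
        rw [List.filter_eq_nil_iff]
        intro x hx
        have hx' : x ∈ l.flatMap g := List.mem_flatMap.2 ⟨a, h, (PySem.Set.mem_ofList _ _).mp hx⟩
        simp [PySem.Set.mem_ofList, hx']
      rw [this, List.append_nil]
    · rw [PySem.Set.add_of_not_mem (by rw [PySem.Set.mem_ofList]; exact h),
        List.flatMap_append, List.flatMap_singleton, PySem.Set.ofList_append, ih]

theorem pvSum_map_pair (l : List (List Int)) (c : Int) (t : List Int) :
    ((l.map fun k => ((k, c) : List Int × Int)).map fun q => if q.1 = t then q.2 else 0).sum
      = c * (l.count t : Int) := by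
  induction l with
  | nil => simp
  | cons k l ih =>
    simp only [List.map_cons, List.sum_cons, ih, List.count_cons]
    by_cases h : k = t
    · subst h; simp; ring
    · simp [h]

theorem pvExp_weight (g : List Int → List (List Int)) (S : List (List Int × Int)) (t : List Int) :
    ((pvExp g S).map fun q => if q.1 = t then q.2 else 0).sum
      = (S.map fun p => p.2 * ((g p.1).count t : Int)).sum := by
  induction S with
  | nil => rfl
  | cons p S ih =>
    rw [pvExp, List.flatMap_cons, List.map_append, List.sum_append, ← pvExp, ih, pvSum_map_pair]
    simp

-- sum of an indicator over a Nodup key list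
theorem pvSum_indicator (K : List (List Int)) (k : List Int) (c : Int)
    (hn : K.Nodup) (hm : k ∈ K) :
    (K.map fun x => if k = x then c else 0).sum = c := by
  induction K with
  | nil => cases hm
  | cons a K ih =>
    rw [List.nodup_cons] at hn
    rw [List.map_cons, List.sum_cons]
    rcases List.mem_cons.1 hm with h | h
    · subst h
      have : (K.map fun x => if k = x then c else 0).sum = 0 := by
        apply List.sum_eq_zero; intro y hy
        simp only [List.mem_map] at hy
        obtain ⟨x, hx, rfl⟩ := hy
        rw [if_neg]; intro e; exact hn.1 (e ▸ hx)
      simp [this]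
    · have hne : k ≠ a := by intro e; exact hn.1 (e ▸ h)
      rw [if_neg hne, ih hn.2 h, zero_add]

theorem pvSum_swap {α β : Type} (K : List α) (S : List β) (f : β → α → Int) :
    (K.map fun x => (S.map fun q => f q x).sum).sum
      = (S.map fun q => (K.map fun x => f q x).sum).sum := by
  induction K with
  | nil => simp
  | cons a K ih =>
    simp only [List.map_cons, List.sum_cons, ih]
    rw [← List.sum_map_add]

-- grouping a stream into its Counter preserves every weighted total Σ p.2 * F p.1
theorem pvSum_items_cnt (F : List Int → Int) (S : List (List Int × Int)) :
    ((pvCnt S).items.map fun p => p.2 * F p.1).sum = (S.map fun p => p.2 * F p.1).sum := by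
  rw [PySem.Dict.items_eq_map_keys (pvCnt S) (pvCnt_nodup S) 0, pvCnt_keys]
  simp only [List.map_map]
  have h1 : ∀ k : List Int,
      ((fun p : List Int × Int => p.2 * F p.1) ∘ fun k => (k, (pvCnt S).getD k 0)) k
        = (S.map fun q => if q.1 = k then q.2 * F q.1 else 0).sum := by
    intro k
    simp only [Function.comp]
    rw [pvCnt_getD]
    induction S with
    | nil => simp
    | cons q S ih =>
      simp only [List.map_cons, List.sum_cons, add_mul, ih]
      by_cases h : q.1 = k
      · rw [if_pos h, if_pos h, h]
      · rw [if_neg h, if_neg h, zero_mul]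
  calc ((PySem.Set.ofList (S.map Prod.fst)).map
          ((fun p : List Int × Int => p.2 * F p.1) ∘ fun k => (k, (pvCnt S).getD k 0))).sum
      = ((PySem.Set.ofList (S.map Prod.fst)).map
          (fun k => (S.map fun q => if q.1 = k then q.2 * F q.1 else 0).sum)).sum := by
        apply congrArg; exact List.map_congr_left (fun k _ => h1 k)
    _ = (S.map fun q => ((PySem.Set.ofList (S.map Prod.fst)).map
          (fun k => if q.1 = k then q.2 * F q.1 else 0)).sum).sum := by
        exact pvSum_swap _ _ _
    _ = (S.map fun q => q.2 * F q.1).sum := by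
        apply congrArg
        apply List.map_congr_left
        intro q hq
        exact pvSum_indicator _ _ _ (PySem.Set.nodup_ofList _)
          ((PySem.Set.mem_ofList _ _).mpr (List.mem_map_of_mem hq))

-- CORE: re-grouping a stream into its Counter before expanding does not change the Counter
theorem pvCnt_exp_items (g : List Int → List (List Int)) (S : List (List Int × Int)) :
    pvCnt (pvExp g (pvCnt S).items) = pvCnt (pvExp g S) := by
  apply PySem.Dict.ext
  rw [PySem.Dict.items_eq_map_keys (pvCnt (pvExp g (pvCnt S).items)) (pvCnt_nodup _) 0,
      PySem.Dict.items_eq_map_keys (pvCnt (pvExp g S)) (pvCnt_nodup _) 0]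
  have hkeys : (pvCnt (pvExp g (pvCnt S).items)).keys = (pvCnt (pvExp g S)).keys := by
    rw [pvCnt_keys, pvCnt_keys]
    have h : ∀ T : List (List Int × Int), (pvExp g T).map Prod.fst = (T.map Prod.fst).flatMap g := by
      intro T
      rw [pvExp, List.map_flatMap, List.flatMap_map]
      congr 1
      funext p
      simp [Function.comp_def]
    have hk2 : (pvCnt S).items.map Prod.fst = PySem.Set.ofList (S.map Prod.fst) := by
      have : (pvCnt S).items.map Prod.fst = (pvCnt S).keys := rfl
      rw [this, pvCnt_keys]
    rw [h ((pvCnt S).items), h S, hk2, pvSet_flatMap_ofList]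
  rw [hkeys]
  apply List.map_congr_left
  intro k hk
  have hv : (pvCnt (pvExp g (pvCnt S).items)).getD k 0 = (pvCnt (pvExp g S)).getD k 0 := by
    rw [pvCnt_getD, pvCnt_getD, pvExp_weight, pvExp_weight]
    exact pvSum_items_cnt (fun x => ((g x).count k : Int)) S
  rw [hv]

theorem pvExp_pvExp (f h : List Int → List (List Int)) (S : List (List Int × Int)) :
    pvExp h (pvExp f S) = pvExp (fun k => (f k).flatMap h) S := by
  simp only [pvExp, List.flatMap_assoc, List.flatMap_map, List.map_flatMap]

-- the generic round fold: iterating "expand, regroup" is one expansion by the composed chain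
theorem pvFoldC {α : Type} (g : α → List Int → List (List Int)) (as : List α)
    (S : List (List Int × Int)) :
    as.foldl (fun d a => pvCnt (pvExp (g a) d.items)) (pvCnt S)
      = pvCnt (pvExp (pvChain g as) S) := by
  induction as generalizing S with
  | nil => simp [pvChain, pvExp]
  | cons a as ih =>
    rw [List.foldl_cons, pvCnt_exp_items, ih, pvExp_pvExp]
    rfl

theorem pvChain_append {α : Type} (g : α → List Int → List (List Int)) (as bs : List α)
    (k : List Int) :
    pvChain g (as ++ bs) k = (pvChain g as k).flatMap (pvChain g bs) := by
  induction as generalizing k with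
  | nil => simp [pvChain]
  | cons a as ih =>
    simp only [List.cons_append, pvChain, List.flatMap_assoc]
    congr 1
    funext x
    exact ih x

theorem pvStepA_cnt (d : PySem.Dict (List Int) Int) (m : Int × Int) :
    pvStepA d m = pvCnt (pvExp (pvGA m) d.items) := by
  rw [pvStepA, pvCnt, pvExp, List.foldl_flatMap]
  rfl

theorem pvStepB_cnt (N i : Int) (d : PySem.Dict (List Int) Int) :
    pvStepB N i d = pvCnt (pvExp (pvGB N i) d.items) := by
  rw [pvStepB, pvCnt, pvExp, List.foldl_flatMap]
  congr 1
  funext nd p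
  rw [pvGB, List.foldl_map, List.foldl_map]

-- pvTupleB on a cons: first loop iteration peeled off, tail re-indexed over List.range
theorem pvTupleB_cons_split (i o : Int) (os : List Int) (k : List Int) (mask : Int) :
    pvTupleB i (o :: os) k mask
      = (List.range os.length).foldl
          (fun (t : List Int) (pn : Nat) =>
            if PySem.Int.mod (PySem.Int.floordiv mask
                ((2 : Int) ^ (((os.length : Int)) - 1 - ((pn : Nat) : Int)).toNat)) 2 ≠ 0
            then pvBumpB t (PySem.List.pyGetD os ((pn : Nat) : Int) 0)
            else pvBumpB t i)
          (if PySem.Int.mod (PySem.Int.floordiv mask ((2 : Int) ^ os.length)) 2 ≠ 0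
           then pvBumpB k o else pvBumpB k i) := by
  rw [pvTupleB]
  have hlen : ((o :: os).length : Int) = ((os.length + 1 : Nat) : Int) := by simp
  rw [hlen, PySem.List.pyRange_zero_natCast]
  have hr : List.range (os.length + 1) = [0] ++ (List.range os.length).map (fun x => 1 + x) := by
    rw [show os.length + 1 = 1 + os.length by omega, List.range_add]
    rfl
  rw [hr, List.map_append, List.foldl_append, List.map_map, List.foldl_map]
  have h0 : (((os.length + 1 : Nat) : Int) - 1 - ((0 : Nat) : Int)).toNat = os.length := by
    push_cast; omega
  have hget0 : PySem.List.pyGetD (o :: os) ((0 : Nat) : Int) 0 = o := by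
    rw [PySem.List.pyGetD_natCast]; rfl
  simp only [List.map_cons, List.map_nil, List.foldl_cons, List.foldl_nil, h0, hget0]
  apply PySem.List.foldl_congr_mem
  intro acc pn _
  have he : (((os.length + 1 : Nat) : Int) - 1 - ((1 + pn : Nat) : Int))
      = ((os.length : Int) - 1 - (pn : Int)) := by push_cast; ring
  have hg : PySem.List.pyGetD (o :: os) ((1 + pn : Nat) : Int) 0
      = PySem.List.pyGetD os ((pn : Nat) : Int) 0 := by
    rw [PySem.List.pyGetD_natCast, PySem.List.pyGetD_natCast, show 1 + pn = pn + 1 by omega]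
    rfl
  simp only [Function.comp_apply]
  rw [he, hg]

theorem pvTupleB_as_range (i : Int) (os : List Int) (t : List Int) (mask : Int) :
    pvTupleB i os t mask
      = (List.range os.length).foldl
          (fun (t : List Int) (pn : Nat) =>
            if PySem.Int.mod (PySem.Int.floordiv mask
                ((2 : Int) ^ (((os.length : Int)) - 1 - ((pn : Nat) : Int)).toNat)) 2 ≠ 0
            then pvBumpB t (PySem.List.pyGetD os ((pn : Nat) : Int) 0)
            else pvBumpB t i)
          t := by
  rw [pvTupleB, PySem.List.pyRange_zero_natCast, List.foldl_map]

theorem pvPow_cast (n : Nat) : ((2 : Int) ^ n) = (((2 ^ n : Nat)) : Int) := by push_cast; rfl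

-- a mask below 2^len: the top bit is 0, so round (o :: os) starts with a home win for i
theorem pvTupleB_low (i o : Int) (os : List Int) (k : List Int) (mn : Nat)
    (h : mn < 2 ^ os.length) :
    pvTupleB i (o :: os) k ((mn : Nat) : Int) = pvTupleB i os (pvBumpB k i) ((mn : Nat) : Int) := by
  rw [pvTupleB_cons_split, pvTupleB_as_range]
  have : PySem.Int.mod (PySem.Int.floordiv ((mn : Nat) : Int) ((2 : Int) ^ os.length)) 2 = 0 := by
    rw [pvPow_cast, PySem.Int.floordiv_natCast, Nat.div_eq_of_lt h]
    rfl
  rw [this]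
  simp

-- a mask 2^len + mn: the top bit is 1 (opponent o wins) and the tail decodes mn
theorem pvTupleB_high (i o : Int) (os : List Int) (k : List Int) (mn : Nat)
    (h : mn < 2 ^ os.length) :
    pvTupleB i (o :: os) k (((2 ^ os.length + mn : Nat)) : Int)
      = pvTupleB i os (pvBumpB k o) ((mn : Nat) : Int) := by
  rw [pvTupleB_cons_split, pvTupleB_as_range]
  have h1 : PySem.Int.mod (PySem.Int.floordiv (((2 ^ os.length + mn : Nat)) : Int)
      ((2 : Int) ^ os.length)) 2 ≠ 0 := by
    rw [pvPow_cast, PySem.Int.floordiv_natCast,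
      show (2 ^ os.length + mn) / 2 ^ os.length = 1 by
        rw [Nat.add_comm, Nat.add_div_right _ (Nat.two_pow_pos _), Nat.div_eq_of_lt h]]
    decide
  rw [if_pos h1]
  apply PySem.List.foldl_congr_mem
  intro acc pn hpn
  have hpn' : pn < os.length := List.mem_range.1 hpn
  have he : ((os.length : Int) - 1 - ((pn : Nat) : Int)).toNat = os.length - 1 - pn := by omega
  have hbits : PySem.Int.mod (PySem.Int.floordiv (((2 ^ os.length + mn : Nat)) : Int)
        ((2 : Int) ^ (os.length - 1 - pn))) 2
      = PySem.Int.mod (PySem.Int.floordiv ((mn : Nat) : Int) ((2 : Int) ^ (os.length - 1 - pn))) 2 := by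
    set e := os.length - 1 - pn with hedef
    rw [pvPow_cast, PySem.Int.floordiv_natCast, PySem.Int.floordiv_natCast,
      show (2 : Int) = ((2 : Nat) : Int) from rfl, PySem.Int.mod_natCast, PySem.Int.mod_natCast]
    congr 1
    have hsplit : 2 ^ os.length = 2 ^ e * (2 * 2 ^ (os.length - e - 1)) := by
      rw [← pow_succ', ← pow_add]
      congr 1
      omega
    rw [hsplit, Nat.mul_add_div (Nat.two_pow_pos _), Nat.mul_add_mod]
  rw [he, hbits]

-- the per-team lemma: composing A's row of matches (i, o) over opps equals B's mask enumeration
theorem pvRow_eq (i : Int) (opps : List Int) (k : List Int) :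
    pvChain pvGA (opps.map fun o => (i, o)) k
      = (PySem.List.pyRange 0 ((2 : Int) ^ opps.length)).map (pvTupleB i opps k) := by
  induction opps generalizing k with
  | nil => rfl
  | cons o os ih =>
    have hsplit : (2 : Nat) ^ (os.length + 1) = 2 ^ os.length + 2 ^ os.length := by
      rw [pow_succ]; omega
    have hrhs : (PySem.List.pyRange 0 ((2 : Int) ^ (o :: os).length)).map (pvTupleB i (o :: os) k)
        = (List.range (2 ^ os.length)).map (fun mn => pvTupleB i (o :: os) k ((mn : Nat) : Int))
          ++ (List.range (2 ^ os.length)).map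
              (fun mn => pvTupleB i (o :: os) k (((2 ^ os.length + mn : Nat)) : Int)) := by
      rw [show (o :: os).length = os.length + 1 from rfl, pvPow_cast,
        PySem.List.pyRange_zero_natCast, hsplit, List.range_add, List.map_append,
        List.map_append, List.map_map, List.map_map, List.map_map]
      rfl
    rw [hrhs, List.map_cons, pvChain, pvGA, List.flatMap_cons, List.flatMap_cons,
      List.flatMap_nil, List.append_nil, ih, ih]
    congr 1
    · rw [pvPow_cast, PySem.List.pyRange_zero_natCast, List.map_map]
      apply List.map_congr_left
      intro mn hmn
      exact (pvTupleB_low i o os k mn (List.mem_range.1 hmn)).symm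
    · rw [pvPow_cast, PySem.List.pyRange_zero_natCast, List.map_map]
      apply List.map_congr_left
      intro mn hmn
      exact (pvTupleB_high i o os k mn (List.mem_range.1 hmn)).symm

-- A's row of matches for team i is its opponent list tagged with i
theorem pvRow_as_map (N i : Int) :
    ((PySem.List.pyRange 0 N).flatMap fun j => if i ≠ j then [(i, j)] else [])
      = ((PySem.List.pyRange 0 N).flatMap fun j => if j ≠ i then [j] else []).map
          (fun o => (i, o)) := by
  rw [List.map_flatMap]
  apply List.flatMap_congr
  intro j _
  by_cases h : i = j
  · subst h
    rw [if_neg (by simp), if_neg (by simp)]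
    rfl
  · rw [if_pos h, if_pos (Ne.symm h)]
    rfl

-- the whole match list, chained, is the team-by-team chain of B's expansions
theorem pvChainA_eq (N : Int) (is : List Int) (k : List Int) :
    pvChain pvGA (is.flatMap fun i =>
        (PySem.List.pyRange 0 N).flatMap fun j => if i ≠ j then [(i, j)] else []) k
      = pvChain (pvGB N) is k := by
  induction is generalizing k with
  | nil => rfl
  | cons i is ih =>
    rw [List.flatMap_cons, pvChain_append, pvRow_as_map, pvRow_eq]
    show ((pvGB N i k).flatMap (pvChain pvGA (is.flatMap _))) = _
    rw [show pvChain (pvGB N) (i :: is) k = (pvGB N i k).flatMap (pvChain (pvGB N) is) from rfl]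
    congr 1
    funext x
    exact ih x

-- the seed dict is the Counter of the one-entry stream
theorem pvSeed_cnt (k : List Int) :
    ((PySem.Dict.empty : PySem.Dict (List Int) Int).insert k 1) = pvCnt [(k, 1)] := by
  simp [pvCnt, PySem.Dict.modify, PySem.Dict.getD_empty]

-- ===== VERDICT (by name: the statement is the Claim_ definition above) =====
theorem possible_point_distributions_spec : Claim_equal_possible_point_distributions := by
  unfold Claim_equal_possible_point_distributions
  intro N _
  unfold Spec_possible_point_distributions possible_point_distributions possible_point_distributions_alt
  have hA : pvStepA = fun d (m : Int × Int) => pvCnt (pvExp (pvGA m) d.items) :=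
    funext fun d => funext fun m => pvStepA_cnt d m
  have hB : (fun dp i => pvStepB N i dp)
      = fun (d : PySem.Dict (List Int) Int) i => pvCnt (pvExp (pvGB N i) d.items) :=
    funext fun d => funext fun i => pvStepB_cnt N i d
  rw [hA, hB, pvSeed_cnt]
  dsimp only
  rw [pvFoldC, pvFoldC]
  have hchain : pvChain pvGA
      ((PySem.List.pyRange 0 N).flatMap fun i =>
        (PySem.List.pyRange 0 N).flatMap fun j => if i ≠ j then [(i, j)] else [])
      = pvChain (pvGB N) (PySem.List.pyRange 0 N) :=
    funext fun k => pvChainA_eq N (PySem.List.pyRange 0 N) k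
  rw [hchain]
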